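-- pv_equiv track=rewrite | github.com/SalahElHazzat/irdm-collab-filtering | deep-cf/lastfm_reader.py | group_data_subset
-- ===== SOURCE A (Python) =====
-- def group_data_subset(raw_data, start, end):
--     data = {}
--     for user_id, song in raw_data[start:end]:
--         if user_id not in data:
--             data[user_id] = []
--         data[user_id].append(song)
--
--     songs = set([song for sublist in [v for _, v in data.items()] for song in sublist])
--     return data, songs
-- ===== SOURCE B (Python) =====
-- def group_data_subset(raw_data, start, end):
--     rows = raw_data[start:end]
--     users = list(dict.fromkeys(u for u, _ in rows))
--     data = {u: [s for v, s in rows if v == u] for u in users}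
--     songs = set(s for u in users for v, s in rows if v == u)
--     return data, songs
-- ===== Notes on version B (the rewrite author's own statement) =====
-- stated objective: alternative
-- what changed: Replaces A's imperative dict-mutation loop (guarded insert then append, followed by a second pass re-scanning the grouped dict values to build the song set) by a declarative decomposition: first dedup the user ids, then build the grouped dict and the song set by per-user filter comprehensions over the slice.
import Mathlib
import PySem

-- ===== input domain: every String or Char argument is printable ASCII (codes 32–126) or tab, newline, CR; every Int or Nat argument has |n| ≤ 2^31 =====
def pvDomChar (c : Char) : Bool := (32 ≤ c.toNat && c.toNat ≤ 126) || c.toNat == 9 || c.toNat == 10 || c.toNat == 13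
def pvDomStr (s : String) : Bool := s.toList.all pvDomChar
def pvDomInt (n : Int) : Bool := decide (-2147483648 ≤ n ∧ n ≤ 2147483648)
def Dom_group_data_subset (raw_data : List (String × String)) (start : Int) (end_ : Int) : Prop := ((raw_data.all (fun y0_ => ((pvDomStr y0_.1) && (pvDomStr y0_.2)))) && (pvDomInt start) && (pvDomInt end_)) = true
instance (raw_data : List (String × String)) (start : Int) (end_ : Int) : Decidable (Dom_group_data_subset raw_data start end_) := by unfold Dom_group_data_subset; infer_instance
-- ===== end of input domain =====

-- ===== PORT A =====
-- B regroups the slice declaratively (dedup users, per-user filters) instead of A's dict-mutation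
-- loop plus a second pass over the grouped values; same return value, different decomposition.
def group_data_subset (raw_data : List (String × String)) (start : Int) (end_ : Int) : (List (String × List String)) × List String :=
  let data := (PySem.List.slice raw_data start end_).foldl
    (fun d p =>
      (if d.contains p.1 then d else d.insert p.1 ([] : List String)).modify p.1 [] (fun l => l ++ [p.2]))
    PySem.Dict.empty
  (data.items, PySem.Set.ofList ((data.items.map (fun kv => kv.2)).flatten))

-- ===== PORT B =====
def group_data_subset_alt (raw_data : List (String × String)) (start : Int) (end_ : Int) : (List (String × List String)) × List String :=
  let rows := PySem.List.slice raw_data start end_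
  let users := PySem.List.dedup (rows.map (fun p => p.1))
  let data := users.map (fun u => (u, (rows.filter (fun p => p.1 == u)).map (fun p => p.2)))
  let songs := PySem.Set.ofList (users.flatMap (fun u => (rows.filter (fun p => p.1 == u)).map (fun p => p.2)))
  (data, songs)

-- ===== PRECONDITION & SPEC =====
def Spec_group_data_subset (raw_data : List (String × String)) (start : Int) (end_ : Int) (out : (List (String × List String)) × List String) : Prop := out = group_data_subset_alt raw_data start end_
instance (raw_data : List (String × String)) (start : Int) (end_ : Int) (out : (List (String × List String)) × List String) : Decidable (Spec_group_data_subset raw_data start end_ out) := by unfold Spec_group_data_subset; infer_instance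

-- ===== CLAIM (what is proved, stated in full; the proofs are below) =====
def Claim_equal_group_data_subset : Prop := ∀ (raw_data : List (String × String)) (start : Int) (end_ : Int), Dom_group_data_subset raw_data start end_ → Spec_group_data_subset raw_data start end_ (group_data_subset raw_data start end_)

-- ===== LEMMAS AND PROOFS =====
-- A's guarded insert-then-append step equals a plain modify (append with default []).
theorem step_eq (d : PySem.Dict String (List String)) (p : String × String) :
    (if d.contains p.1 then d else d.insert p.1 ([] : List String)).modify p.1 [] (fun l => l ++ [p.2])
      = d.modify p.1 [] (fun l => l ++ [p.2]) := by
  by_cases h : d.contains p.1 = true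
  · simp [h]
  · rw [if_neg (by simp [h])]
    rw [PySem.Dict.modify, PySem.Dict.modify, PySem.Dict.getD_insert_self,
        PySem.Dict.insert_insert_self, PySem.Dict.getD_of_not_contains _ _ (by simpa using h)]

-- For any list of rows, A's grouped dict and derived song set equal B's declarative construction.
theorem main_eq (rows : List (String × String)) :
    (((rows.foldl
        (fun d p =>
          (if d.contains p.1 then d else d.insert p.1 ([] : List String)).modify p.1 [] (fun l => l ++ [p.2]))
        PySem.Dict.empty).items,
      PySem.Set.ofList (((rows.foldl
        (fun d p =>
          (if d.contains p.1 then d else d.insert p.1 ([] : List String)).modify p.1 [] (fun l => l ++ [p.2]))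
        PySem.Dict.empty).items.map (fun kv => kv.2)).flatten)) :
        (List (String × List String)) × List String)
    = ((PySem.List.dedup (rows.map (fun p => p.1))).map
        (fun u => (u, (rows.filter (fun p => p.1 == u)).map (fun p => p.2))),
       PySem.Set.ofList ((PySem.List.dedup (rows.map (fun p => p.1))).flatMap
        (fun u => (rows.filter (fun p => p.1 == u)).map (fun p => p.2)))) := by
  have hf : (fun (d : PySem.Dict String (List String)) (p : String × String) =>
      (if d.contains p.1 then d else d.insert p.1 ([] : List String)).modify p.1 [] (fun l => l ++ [p.2]))
      = (fun d p => d.modify p.1 [] (fun l => l ++ [p.2])) := by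
    funext d p; exact step_eq d p
  simp only [hf]
  set D := rows.foldl (fun d p => d.modify p.1 [] (fun l => l ++ [p.2])) PySem.Dict.empty with hD
  have hkeys : D.keys = PySem.List.dedup (rows.map (fun p => p.1)) := by
    rw [hD, PySem.Dict.keys_foldl_modify_key rows (fun p => p.1) [] (fun _ p => (fun l => l ++ [p.2]))]
    simp [PySem.Dict.keys_empty, PySem.List.dedup_eq_ofList]
    rfl
  have hnodup : D.keys.Nodup := by
    rw [hD]
    exact PySem.Dict.nodup_keys_foldl_modify_key rows (fun p => p.1) [] (fun _ p => (fun l => l ++ [p.2])) _ (by simp)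
  have hget : ∀ u, D.getD u [] = (rows.filter (fun p => p.1 == u)).map (fun p => p.2) := by
    intro u
    rw [hD, PySem.Dict.getD_foldl_modify_append]
    simp
  have hitems : D.items = (PySem.List.dedup (rows.map (fun p => p.1))).map
      (fun u => (u, (rows.filter (fun p => p.1 == u)).map (fun p => p.2))) := by
    rw [PySem.Dict.items_eq_map_keys D hnodup [], hkeys]
    simp only [hget]
  rw [hitems]
  simp [List.map_map, List.flatMap_def, Function.comp_def]

-- ===== VERDICT (by name: the statement is the Claim_ definition above) =====
theorem group_data_subset_spec : Claim_equal_group_data_subset := by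
  intro raw_data start end_ _
  show group_data_subset raw_data start end_ = group_data_subset_alt raw_data start end_
  simp only [group_data_subset, group_data_subset_alt]
  exact main_eq (PySem.List.slice raw_data start end_)
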